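-- pv_equiv track=rewrite | github.com/L000Pz/SkyScrapersPuzzle | logic.py | check_visibility_from_direction
-- ===== SOURCE A (Python) =====
-- from typing import List, Tuple, Optional, Dict
--
-- def check_visibility_from_direction(line: List[int]) -> int:
--     """
--     Count how many buildings are visible when looking along a line of buildings.
--     A building is visible if it's taller than all buildings before it.
--
--     Args:
--         line: List of building heights
--
--     Returns:
--         int: Number of visible buildings, or -1 if line contains empty cells
--     """
--     if 0 in line:  # Skip incomplete lines
--         return -1
--
--     visible = 0
--     max_height = 0
--     for height in line:
--         if height > max_height:
--             visible += 1
--             max_height = height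
--     return visible
-- ===== SOURCE B (Python) =====
-- def check_visibility_from_direction(line):
--     if 0 in line:  # Skip incomplete lines
--         return -1
--     return _count_above(line, 0)
--
--
-- def _count_above(seq, bound):
--     """Divide and conquer: visible buildings in seq taller than bound =
--     those in the left half taller than bound, plus those in the right half
--     taller than max(bound, tallest of the left half)."""
--     if not seq:
--         return 0
--     if len(seq) == 1:
--         return 1 if seq[0] > bound else 0
--     mid = len(seq) // 2
--     left, right = seq[:mid], seq[mid:]
--     return _count_above(left, bound) + _count_above(right, max(bound, max(left)))
-- ===== Notes on version B (the rewrite author's own statement) =====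
-- stated objective: alternative
-- what changed: B replaces A's single left-to-right loop with a running maximum by a divide-and-conquer recursion: it splits the line in half, counts records above the threshold in the left half, and recurses on the right half with the threshold raised to the left half's maximum.
import Mathlib
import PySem

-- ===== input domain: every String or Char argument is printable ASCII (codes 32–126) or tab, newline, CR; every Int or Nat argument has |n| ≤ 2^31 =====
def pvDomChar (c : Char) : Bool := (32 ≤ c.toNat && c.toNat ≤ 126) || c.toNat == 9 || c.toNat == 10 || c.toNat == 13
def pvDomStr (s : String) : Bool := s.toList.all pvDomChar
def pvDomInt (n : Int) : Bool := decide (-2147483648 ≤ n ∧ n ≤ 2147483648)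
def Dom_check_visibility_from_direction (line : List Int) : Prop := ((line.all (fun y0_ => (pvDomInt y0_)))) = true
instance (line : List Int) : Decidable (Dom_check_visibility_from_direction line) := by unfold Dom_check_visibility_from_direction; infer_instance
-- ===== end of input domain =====

-- B replaces A's single running-maximum loop by a divide-and-conquer recursion on
-- halves of the line (alternative decomposition; not claimed faster).

-- ===== PORT A =====
-- single loop carrying (visible, max_height)
def check_visibility_from_direction (line : List Int) : Int :=
  if 0 ∈ line then -1
  else
    (line.foldl (fun s height => if height > s.2 then (s.1 + 1, height) else s)
      ((0 : Int), (0 : Int))).1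

-- ===== PORT B =====
-- _count_above(seq, bound): split at mid = len // 2, recurse left with bound,
-- recurse right with bound raised to max(left).
-- Python's max(left) is ported as left.max?.getD 0, exact here since left ≠ [] on this branch.
def cvfd_count_above (seq : List Int) (bound : Int) : Int :=
  match seq with
  | [] => 0
  | [x] => if x > bound then 1 else 0
  | x :: y :: rest =>
    cvfd_count_above ((x :: y :: rest).take ((rest.length + 2) / 2)) bound
      + cvfd_count_above ((x :: y :: rest).drop ((rest.length + 2) / 2))
          (max bound (((x :: y :: rest).take ((rest.length + 2) / 2)).max?.getD 0))
termination_by seq.length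
decreasing_by
  all_goals (simp; try omega)

def check_visibility_from_direction_alt (line : List Int) : Int :=
  if 0 ∈ line then -1
  else cvfd_count_above line 0

-- ===== PRECONDITION & SPEC =====
def Spec_check_visibility_from_direction (line : List Int) (out : Int) : Prop := out = check_visibility_from_direction_alt line
instance (line : List Int) (out : Int) : Decidable (Spec_check_visibility_from_direction line out) := by unfold Spec_check_visibility_from_direction; infer_instance

-- ===== CLAIM (what is proved, stated in full; the proofs are below) =====
def Claim_equal_check_visibility_from_direction : Prop := ∀ (line : List Int), Dom_check_visibility_from_direction line → Spec_check_visibility_from_direction line (check_visibility_from_direction line)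

-- ===== LEMMAS AND PROOFS =====

-- A's loop body
def cvfd_step (s : Int × Int) (height : Int) : Int × Int :=
  if height > s.2 then (s.1 + 1, height) else s

-- the second component of A's fold is the running maximum
theorem cvfd_snd (l : List Int) : ∀ (v m : Int),
    (l.foldl cvfd_step (v, m)).2 = l.foldl max m := by
  induction l with
  | nil => intro v m; rfl
  | cons h t ih =>
    intro v m
    by_cases hgt : h > m
    · simp [cvfd_step, hgt, ih, max_eq_right (le_of_lt hgt)]
    · simp [cvfd_step, hgt, ih, max_eq_left (by omega : h ≤ m)]

-- the counter is additive in its starting value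
theorem cvfd_fst_shift (l : List Int) : ∀ (v m : Int),
    (l.foldl cvfd_step (v, m)).1 = v + (l.foldl cvfd_step (0, m)).1 := by
  induction l with
  | nil => intro v m; simp
  | cons h t ih =>
    intro v m
    by_cases hgt : h > m
    · simp only [List.foldl_cons, cvfd_step, if_pos hgt]
      rw [ih (v + 1) h, ih (0 + 1) h]; ring
    · simp only [List.foldl_cons, cvfd_step, if_neg hgt]
      exact ih v m

-- folding max distributes over an outer max
theorem cvfd_foldl_max (as : List Int) : ∀ (a b : Int),
    max b (as.foldl max a) = as.foldl max (max b a) := by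
  induction as with
  | nil => intro a b; rfl
  | cons c cs ih =>
    intro a b
    simp only [List.foldl_cons]
    rw [ih (max a c) b, max_assoc]

-- max b (max of a nonempty list, Python-style) = fold of max from b
theorem cvfd_max_eq (l : List Int) (b : Int) (hl : l ≠ []) :
    max b (l.max?.getD 0) = l.foldl max b := by
  match l with
  | [] => exact absurd rfl hl
  | a :: as =>
    simp only [List.max?_cons', Option.getD_some, List.foldl_cons]
    exact cvfd_foldl_max as a b

-- the divide-and-conquer count equals A's loop count started at threshold m
theorem cvfd_count_above_eq_aux : ∀ (n : Nat) (seq : List Int), seq.length = n → ∀ (m : Int),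
    cvfd_count_above seq m = (seq.foldl cvfd_step (0, m)).1 := by
  intro n
  induction n using Nat.strong_induction_on with
  | _ n ih =>
    intro seq hlen m
    match seq with
    | [] => simp [cvfd_count_above]
    | [x] =>
      simp only [cvfd_count_above, List.foldl_cons, List.foldl_nil, cvfd_step]
      split_ifs with h <;> simp
    | x :: y :: rest =>
      rw [cvfd_count_above]
      set s := x :: y :: rest with hs
      set mid := (rest.length + 2) / 2 with hmid
      have hslen : s.length = rest.length + 2 := by simp [hs]
      have hmid1 : 1 ≤ mid := by omega
      have hmidlt : mid < s.length := by omega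
      have hsplit : s.take mid ++ s.drop mid = s := List.take_append_drop mid s
      have htne : s.take mid ≠ [] := by
        simp [List.take_eq_nil_iff]; omega
      have hlt1 : (s.take mid).length < n := by
        rw [List.length_take]; omega
      have hlt2 : (s.drop mid).length < n := by
        rw [List.length_drop]; omega
      calc cvfd_count_above (s.take mid) m
            + cvfd_count_above (s.drop mid) (max m ((s.take mid).max?.getD 0))
          = ((s.take mid).foldl cvfd_step (0, m)).1
            + ((s.drop mid).foldl cvfd_step (0, (s.take mid).foldl max m)).1 := by
            rw [ih _ hlt1 _ rfl, ih _ hlt2 _ rfl, cvfd_max_eq _ _ htne]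
        _ = (s.foldl cvfd_step (0, m)).1 := by
            conv_rhs => rw [← hsplit]
            rw [List.foldl_append]
            rcases hp : (s.take mid).foldl cvfd_step (0, m) with ⟨v1, m1⟩
            have h2 : m1 = (s.take mid).foldl max m := by
              have := cvfd_snd (s.take mid) 0 m; rw [hp] at this; exact this
            have h1 : v1 = ((s.take mid).foldl cvfd_step (0, m)).1 := by rw [hp]
            rw [cvfd_fst_shift _ v1 m1, h1, h2]

theorem cvfd_count_above_eq (seq : List Int) (m : Int) :
    cvfd_count_above seq m = (seq.foldl cvfd_step (0, m)).1 :=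
  cvfd_count_above_eq_aux seq.length seq rfl m

-- ===== VERDICT (by name: the statement is the Claim_ definition above) =====
theorem check_visibility_from_direction_spec : Claim_equal_check_visibility_from_direction := by
  intro line _
  unfold Spec_check_visibility_from_direction check_visibility_from_direction
    check_visibility_from_direction_alt
  by_cases h0 : (0 : Int) ∈ line
  · simp [h0]
  · simp only [if_neg h0]
    rw [cvfd_count_above_eq]
    rfl
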